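-- pv_equiv track=rewrite | github.com/loadsoth/DSBrowser | dsconfig.py | search_funny
-- ===== SOURCE A (Python) =====
-- bloodlist = ('Ec','Fa','Hmp','Her','Him','ND','Nas','Nea','Mach',
--                  'Sts','Swn','Pha','RC','Ted','Tom')#系統の短縮名
--
-- def search_funny( eight_list ):
--     ret = False
--     count = 0
--
--     for i in bloodlist:
--         for j in eight_list:
--             if i == j:
--                 count += 1
--                 break
--
--     if count >= 7:
--         ret = True
--     return ret
-- ===== SOURCE B (Python) =====
-- bloodlist = ('Ec','Fa','Hmp','Her','Him','ND','Nas','Nea','Mach',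
--                  'Sts','Swn','Pha','RC','Ted','Tom')
--
-- def search_funny(eight_list):
--     # Single pass over eight_list: shrink the set of not-yet-seen bloodlist
--     # names and return True as soon as 7 distinct names have been found.
--     remaining = set(bloodlist)
--     for j in eight_list:
--         remaining.discard(j)
--         if len(remaining) <= len(bloodlist) - 7:
--             return True
--     return False
-- ===== Notes on version B (the rewrite author's own statement) =====
-- stated objective: alternative
-- what changed: Inverts the traversal: instead of A's outer loop over the 15 bloodlist names each scanning eight_list, B makes a single pass over eight_list, discarding each element from a shrinking set of not-yet-matched bloodlist names, and returns True early as soon as 7 distinct names have been found (remaining set down to 8).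
import Mathlib
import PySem

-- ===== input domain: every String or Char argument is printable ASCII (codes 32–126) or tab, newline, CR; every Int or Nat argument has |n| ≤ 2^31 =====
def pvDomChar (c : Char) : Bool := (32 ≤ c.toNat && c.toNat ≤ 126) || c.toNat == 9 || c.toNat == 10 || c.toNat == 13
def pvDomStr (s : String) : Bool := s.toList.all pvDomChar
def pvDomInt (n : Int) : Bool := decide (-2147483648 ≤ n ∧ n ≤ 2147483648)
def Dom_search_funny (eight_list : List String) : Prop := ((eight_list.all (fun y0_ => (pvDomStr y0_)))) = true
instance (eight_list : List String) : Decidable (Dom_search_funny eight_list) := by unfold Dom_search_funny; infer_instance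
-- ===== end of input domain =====

-- B inverts the traversal: one pass over eight_list discarding from a shrinking set of
-- not-yet-matched bloodlist names, returning True early once 7 distinct names were seen (alternative).

-- module-level constant shared by both versions
def bloodlist : List String :=
  ["Ec","Fa","Hmp","Her","Him","ND","Nas","Nea","Mach","Sts","Swn","Pha","RC","Ted","Tom"]

-- ===== PORT A =====
-- inner 'for j in eight_list: if i == j: count += 1; break' — returns whether the break fires
def pvInnerHit (i : String) : List String → Bool
  | [] => false
  | j :: rest => if i == j then true else pvInnerHit i rest

def search_funny (eight_list : List String) : Bool :=
  let count : Int := bloodlist.foldl (fun c i => if pvInnerHit i eight_list then c + 1 else c) 0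
  if count ≥ 7 then true else false

-- ===== PORT B =====
-- 'for j in eight_list: remaining.discard(j); if len(remaining) <= len(bloodlist)-7: return True'
def pvLoopB (remaining : PySem.Set String) : List String → Bool
  | [] => false
  | j :: rest =>
      let r := PySem.Set.discard remaining j
      if PySem.Set.len r ≤ (bloodlist.length : Int) - 7 then true
      else pvLoopB r rest

def search_funny_alt (eight_list : List String) : Bool :=
  pvLoopB (PySem.Set.ofList bloodlist) eight_list

-- ===== PRECONDITION & SPEC =====
def Spec_search_funny (eight_list : List String) (out : Bool) : Prop := out = search_funny_alt eight_list
instance (eight_list : List String) (out : Bool) : Decidable (Spec_search_funny eight_list out) := by unfold Spec_search_funny; infer_instance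

-- ===== CLAIM =====
def Claim_equal_search_funny : Prop := ∀ (eight_list : List String), Dom_search_funny eight_list → Spec_search_funny eight_list (search_funny eight_list)

-- ===== LEMMAS AND PROOFS =====
lemma pvInnerHit_eq_contains (i : String) (l : List String) : pvInnerHit i l = l.contains i := by
  induction l with
  | nil => rfl
  | cons j rest ih =>
      simp only [pvInnerHit, List.contains_cons]
      by_cases h : i = j
      · simp [h]
      · simp [h, ih, beq_iff_eq]

lemma count_foldl_eq_countP (el : List String) :
    bloodlist.foldl (fun c i => if pvInnerHit i el then c + 1 else c) (0 : Int)
      = (bloodlist.countP (fun i => el.contains i) : Int) := by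
  have : ∀ (bs : List String) (c : Int),
      bs.foldl (fun c i => if pvInnerHit i el then c + 1 else c) c
        = c + (bs.countP (fun i => el.contains i) : Int) := by
    intro bs
    induction bs with
    | nil => intro c; simp [List.countP]
    | cons b bs ih =>
        intro c
        simp only [List.foldl_cons]
        rw [ih, List.countP_cons, pvInnerHit_eq_contains]
        by_cases h : b ∈ el <;> simp [h] <;> omega
  simpa using this bloodlist 0

lemma discard_eq_filter (s : List String) (x : String) :
    PySem.Set.discard s x = s.filter (fun y => decide ¬(y = x)) := by
  simp only [PySem.Set.discard]
  exact List.filter_congr (by intro a _; by_cases h : a = x <;> simp [h])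

-- A's manual count via B's remaining set: the loop returns true iff after removing
-- everything in l, at most 8 of remaining would be left, provided l is non-empty.
lemma pvLoopB_true (l : List String) : ∀ (r : List String),
    pvLoopB r l = true ↔ (l ≠ [] ∧ (r.filter (fun x => decide (x ∉ l))).length ≤ 8) := by
  induction l with
  | nil => intro r; simp [pvLoopB]
  | cons j rest ih =>
      intro r
      have hfil : r.filter (fun x => decide (x ∉ j :: rest))
          = (r.filter (fun y => decide ¬(y = j))).filter (fun x => decide (x ∉ rest)) := by
        rw [List.filter_filter]
        exact List.filter_congr (by intro a _; by_cases h1 : a = j <;> by_cases h2 : a ∈ rest <;> simp [h1, h2, List.mem_cons])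
      simp only [pvLoopB, discard_eq_filter]
      set r' := r.filter (fun y => decide ¬(y = j)) with hr'
      have hb15 : bloodlist.length = 15 := by decide
      by_cases hc : PySem.Set.len r' ≤ (bloodlist.length : Int) - 7
      · have hlen : r'.length ≤ 8 := by
          simp only [PySem.Set.len, hb15] at hc; omega
        simp only [if_pos hc]
        constructor
        · intro _
          refine ⟨by simp, ?_⟩
          rw [hfil]
          exact le_trans (List.length_filter_le _ _) hlen
        · intro _; trivial
      · have hlen : ¬ r'.length ≤ 8 := by
          simp only [PySem.Set.len, hb15] at hc ⊢; omega
        simp only [if_neg hc]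
        rw [ih r', hfil]
        rcases eq_or_ne rest [] with hrest | hrest
        · subst hrest
          simp only [ne_eq, not_true_eq_false, false_and, false_iff, not_and]
          intro _
          simpa using hlen
        · simp [hrest]

lemma countP_split (el : List String) :
    bloodlist.countP (fun i => el.contains i)
      + (bloodlist.filter (fun x => decide (x ∉ el))).length = bloodlist.length := by
  have h1 : (bloodlist.filter (fun x => decide (x ∉ el))).length
      = bloodlist.countP (fun a => decide ¬(el.contains a = true)) := by
    rw [← List.countP_eq_length_filter]
    exact List.countP_congr (by intro x _; by_cases hx : x ∈ el <;> simp [hx])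
  rw [h1]
  exact (List.length_eq_countP_add_countP (fun i => el.contains i) (l := bloodlist)).symm

-- ===== VERDICT =====
theorem search_funny_spec : Claim_equal_search_funny := by
  intro el _
  unfold Spec_search_funny
  rcases eq_or_ne el [] with h | h
  · subst h; decide
  · rw [Bool.eq_iff_iff]
    unfold search_funny search_funny_alt
    have hbl : PySem.Set.ofList bloodlist = bloodlist := by decide
    rw [hbl, pvLoopB_true]
    have hsplit := countP_split el
    have hlen : bloodlist.length = 15 := by decide
    rw [← List.countP_eq_length_filter] at hsplit
    by_cases h7 : ((bloodlist.countP (fun i => el.contains i) : Int)) ≥ 7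
    · simp only [count_foldl_eq_countP, if_pos h7, true_iff]
      refine ⟨h, ?_⟩
      rw [← List.countP_eq_length_filter]
      omega
    · simp only [count_foldl_eq_countP, if_neg h7]
      constructor
      · intro hfalse; exact absurd hfalse (by simp)
      · rintro ⟨-, hB⟩
        rw [← List.countP_eq_length_filter] at hB
        omega
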